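-- pv_equiv track=rewrite | github.com/Kekega/tphya-lab1 | main.py | first_split_classes
-- ===== SOURCE A (Python) =====
-- def first_split_classes(dict):
--     unified = {}
--     eq_classes = {}
--     num_classes = 0
--     for nont, definition in dict.items():
--         raw_rules_list = []
--         for elem in definition:
--             t = get_raw_rules(dict, elem)
--             raw_rules_list.append(t)
--         unified[nont] = raw_rules_list
--         eq_classes, num_classes = fill_eq_classes(unified, nont, eq_classes, num_classes)
--     return eq_classes, unified, num_classes
--
-- def get_raw_rules(d, item):
--     pattern = ""
--     for symbol in item:
--         if symbol in d.keys():
--             pattern += "_"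
--         else:
--             pattern += symbol
--     return pattern
--
-- def fill_eq_classes(parent_dict, item, eq_classes, num):
--     t = parent_dict[item]
--     for nont, pattern in parent_dict.items():
--         if nont != item and set(t) == set(pattern):
--             eq_classes[item] = eq_classes.get(nont)
--             return eq_classes, num
--     eq_classes[item] = num
--     num += 1
--     return eq_classes, num
-- ===== SOURCE B (Python) =====
-- def first_split_classes(dict):
--     keys = set(dict.keys())
--     class_of = {}          # frozenset of patterns -> class number
--     eq_classes = {}
--     unified = {}
--     num_classes = 0
--     for nont, definition in dict.items():
--         patterns = ["".join("_" if ch in keys else ch for ch in rule)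
--                     for rule in definition]
--         unified[nont] = patterns
--         key = frozenset(patterns)
--         if key in class_of:
--             eq_classes[nont] = class_of[key]
--         else:
--             class_of[key] = num_classes
--             eq_classes[nont] = num_classes
--             num_classes += 1
--     return eq_classes, unified, num_classes
-- ===== Notes on version B (the rewrite author's own statement) =====
-- stated objective: faster
-- what changed: Replaces the quadratic inner rescan of all previously unified nonterminals (set(t)==set(p) against every earlier entry, per nonterminal) by a single pass that hashes each pattern set as a frozenset into a dict mapping it to its class number, and precomputes the key set once.
import Mathlib
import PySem

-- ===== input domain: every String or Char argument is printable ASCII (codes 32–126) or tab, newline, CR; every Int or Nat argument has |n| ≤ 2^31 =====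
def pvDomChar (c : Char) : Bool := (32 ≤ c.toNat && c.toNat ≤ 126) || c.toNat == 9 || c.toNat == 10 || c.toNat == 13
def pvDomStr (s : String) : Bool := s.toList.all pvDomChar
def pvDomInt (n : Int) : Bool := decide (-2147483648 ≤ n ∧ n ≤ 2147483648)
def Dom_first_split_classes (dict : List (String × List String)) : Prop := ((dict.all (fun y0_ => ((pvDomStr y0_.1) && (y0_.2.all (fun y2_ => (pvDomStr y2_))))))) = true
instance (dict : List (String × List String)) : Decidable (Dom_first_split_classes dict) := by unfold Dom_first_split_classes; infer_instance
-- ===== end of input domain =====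

-- B replaces A's inner rescan of all previously unified nonterminals by a one-pass
-- dict keyed by the frozenset of a nonterminal's pattern list (objective: faster).

-- ===== PORT A =====

-- set(t) == set(pattern): equality of the two string lists as sets
def pvSetEq (a b : List String) : Bool :=
  a.all (fun x => b.contains x) && b.all (fun x => a.contains x)

-- get_raw_rules: character loop building `pattern` by successive '+=' appends
def get_raw_rules (d : List (String × List String)) (item : String) : String :=
  String.mk (item.toList.foldl
    (fun acc c => acc ++ [if d.any (fun kv => kv.1 == String.singleton c) then '_' else c]) [])

-- the 'for nont, pattern in parent_dict.items()' loop of fill_eq_classes, with its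
-- early return; falling off the loop reaches the trailing assignment
def pvFillLoop (t : List String) (item : String) (eq : PySem.Dict String Int) (num : Int) :
    List (String × List String) → PySem.Dict String Int × Int
  | [] => (eq.insert item num, num + 1)
  | (nont, pattern) :: rest =>
      if (nont != item) && pvSetEq t pattern then
        -- eq_classes.get(nont): nont is an earlier nonterminal, always present; default 0 unreachable
        (eq.insert item (eq.getD nont 0), num)
      else pvFillLoop t item eq num rest

def fill_eq_classes (parent : PySem.Dict String (List String)) (item : String)
    (eq : PySem.Dict String Int) (num : Int) : PySem.Dict String Int × Int :=
  -- parent_dict[item]: item was just inserted, so the KeyError default [] is unreachable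
  pvFillLoop (parent.getD item []) item eq num parent.items

def pvStepA (dict : List (String × List String))
    (st : PySem.Dict String (List String) × PySem.Dict String Int × Int)
    (kv : String × List String) :
    PySem.Dict String (List String) × PySem.Dict String Int × Int :=
  let raw := kv.2.foldl (fun l elem => l ++ [get_raw_rules dict elem]) []
  let uni := st.1.insert kv.1 raw
  let en := fill_eq_classes uni kv.1 st.2.1 st.2.2
  (uni, en.1, en.2)

def first_split_classes (dict : List (String × List String)) :
    (List (String × Int)) × (List (String × List String)) × Int :=
  let st := dict.foldl (pvStepA dict) (PySem.Dict.empty, PySem.Dict.empty, 0)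
  (st.2.1.items, st.1.items, st.2.2)

-- ===== PORT B =====

-- class_of is a dict keyed by frozensets: association list whose keys are the
-- distinct pattern strings (PySem.Set) and whose key equality is set equality
def pvClassLookup (cls : List (PySem.Set String × Int)) (key : List String) : Option Int :=
  match cls with
  | [] => none
  | p :: rest => if pvSetEq key p.1 then some p.2 else pvClassLookup rest key

def pvStepB (keyset : PySem.Set String)
    (st : List (PySem.Set String × Int) × PySem.Dict String Int × PySem.Dict String (List String) × Int)
    (kv : String × List String) :
    List (PySem.Set String × Int) × PySem.Dict String Int × PySem.Dict String (List String) × Int :=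
  let patterns := kv.2.map (fun rule =>
    String.mk (rule.toList.map (fun ch => if keyset.contains (String.singleton ch) then '_' else ch)))
  let uni := st.2.2.1.insert kv.1 patterns
  match pvClassLookup st.1 (PySem.Set.ofList patterns) with
  | some v => (st.1, st.2.1.insert kv.1 v, uni, st.2.2.2)
  | none =>
      -- inserting an absent frozenset key into class_of appends it
      (st.1 ++ [(PySem.Set.ofList patterns, st.2.2.2)],
       st.2.1.insert kv.1 st.2.2.2, uni, st.2.2.2 + 1)

def first_split_classes_alt (dict : List (String × List String)) :
    (List (String × Int)) × (List (String × List String)) × Int :=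
  let keyset := PySem.Set.ofList (dict.map Prod.fst)
  let st := dict.foldl (pvStepB keyset) ([], PySem.Dict.empty, PySem.Dict.empty, 0)
  (st.2.1.items, st.2.2.1.items, st.2.2.2)

-- ===== PRECONDITION & SPEC =====
-- Pre_ requires the keys of the association list to be distinct: the Python argument is a
-- dict, which cannot contain duplicate keys, so this excludes no actual Python input.
def Pre_first_split_classes (dict : List (String × List String)) : Prop :=
  (dict.map Prod.fst).Nodup
instance (dict : List (String × List String)) : Decidable (Pre_first_split_classes dict) := by
  unfold Pre_first_split_classes; infer_instance

def pvWitness_first_split_classes : (List (String × List String)) :=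
  [("S", ["aA", "b"]), ("A", ["b", "aA"]), ("B", ["c"])]

def Spec_first_split_classes (dict : List (String × List String)) (out : (List (String × Int)) × (List (String × List String)) × Int) : Prop := out = first_split_classes_alt dict
instance (dict : List (String × List String)) (out : (List (String × Int)) × (List (String × List String)) × Int) : Decidable (Spec_first_split_classes dict out) := by unfold Spec_first_split_classes; infer_instance

-- ===== CLAIM (what is proved, stated in full; the proofs are below) =====
def Claim_equal_first_split_classes : Prop := ∀ (dict : List (String × List String)), Dom_first_split_classes dict → Pre_first_split_classes dict → Spec_first_split_classes dict (first_split_classes dict)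

-- ===== LEMMAS AND PROOFS =====

theorem pvSetEq_iff (a b : List String) :
    pvSetEq a b = true ↔ ∀ x, x ∈ a ↔ x ∈ b := by
  simp only [pvSetEq, Bool.and_eq_true, List.all_eq_true, List.contains_iff_mem]
  constructor
  · rintro ⟨h1, h2⟩ x; exact ⟨fun hx => h1 x hx, fun hx => h2 x hx⟩
  · intro h; exact ⟨fun x hx => (h x).1 hx, fun x hx => (h x).2 hx⟩

theorem pvSetEq_congr_left {t' t : List String} (h : pvSetEq t' t = true) (y : List String) :
    pvSetEq t' y = pvSetEq t y := by
  rw [Bool.eq_iff_iff, pvSetEq_iff, pvSetEq_iff]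
  rw [pvSetEq_iff] at h
  constructor <;> intro hy x <;> rw [← hy x] <;> [exact (h x).symm; exact h x]

theorem pvSetEq_ofList_left (a b : List String) :
    pvSetEq (PySem.Set.ofList a) b = pvSetEq a b := by
  rw [Bool.eq_iff_iff, pvSetEq_iff, pvSetEq_iff]
  constructor <;> intro h x <;> rw [← h x] <;> simp [PySem.Set.mem_ofList]

theorem pvSetEq_ofList_right (a b : List String) :
    pvSetEq a (PySem.Set.ofList b) = pvSetEq a b := by
  rw [Bool.eq_iff_iff, pvSetEq_iff, pvSetEq_iff]
  constructor <;> intro h x <;> rw [h x] <;> simp [PySem.Set.mem_ofList]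

theorem pvFoldl_append_singleton_eq_map {α β : Type} (f : α → β) (l : List α) (init : List β) :
    l.foldl (fun acc x => acc ++ [f x]) init = init ++ l.map f := by
  induction l generalizing init with
  | nil => simp
  | cons x xs ih => simp [List.foldl_cons, ih]

-- A's raw-rule string equals B's per-rule pattern string
theorem pvPattern_eq (dict : List (String × List String)) (rule : String) :
    get_raw_rules dict rule =
      String.mk (rule.toList.map (fun ch =>
        if (PySem.Set.ofList (dict.map Prod.fst)).contains (String.singleton ch) then '_' else ch)) := by
  unfold get_raw_rules
  rw [pvFoldl_append_singleton_eq_map]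
  congr 1
  apply List.map_congr_left
  intro c _
  have : dict.any (fun kv => kv.1 == String.singleton c) =
      (PySem.Set.ofList (dict.map Prod.fst)).contains (String.singleton c) := by
    rw [Bool.eq_iff_iff]
    simp only [List.any_eq_true, beq_iff_eq, PySem.Set.contains, List.elem_iff,
      PySem.Set.mem_ofList, List.mem_map]
  rw [this]

-- A's whole raw_rules_list equals B's patterns list
theorem pvPatterns_eq (dict : List (String × List String)) (defn : List String) :
    defn.foldl (fun l elem => l ++ [get_raw_rules dict elem]) [] =
      defn.map (fun rule =>
        String.mk (rule.toList.map (fun ch =>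
          if (PySem.Set.ofList (dict.map Prod.fst)).contains (String.singleton ch) then '_' else ch))) := by
  rw [pvFoldl_append_singleton_eq_map]
  simp only [List.nil_append]
  exact List.map_congr_left (fun r _ => pvPattern_eq dict r)

-- the invariant tying B's class_of to A's scan of the unified entries
def pvInv (cls : List (PySem.Set String × Int)) (items : List (String × List String))
    (eq : PySem.Dict String Int) : Prop :=
  ∀ t, pvClassLookup cls t =
    (items.find? (fun p => pvSetEq t p.2)).map (fun p => eq.getD p.1 0)

-- the fill loop over items ++ [(item, t)] is the first-match scan of items
theorem pvFillLoop_eq (t : List String) (item : String) (eq : PySem.Dict String Int) (num : Int)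
    (items : List (String × List String)) (hk : ∀ p ∈ items, p.1 ≠ item) :
    pvFillLoop t item eq num (items ++ [(item, t)]) =
      match items.find? (fun p => pvSetEq t p.2) with
      | some p => (eq.insert item (eq.getD p.1 0), num)
      | none => (eq.insert item num, num + 1) := by
  induction items with
  | nil => simp [pvFillLoop]
  | cons p rest ih =>
      have hne : (p.1 != item) = true := by
        simpa using hk p (List.mem_cons_self ..)
      obtain ⟨n, pat⟩ := p
      rw [List.cons_append]
      rw [pvFillLoop]
      simp only at hne
      by_cases hs : pvSetEq t pat = true
      · simp [hne, hs]
      · have hcond : ((n != item) && pvSetEq t pat) = false := by simp [hs]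
        simp only [hcond, Bool.false_eq_true, if_false]
        rw [ih (fun q hq => hk q (List.mem_cons_of_mem _ hq))]
        simp [hs]

theorem pvClassLookup_append (cls : List (PySem.Set String × Int)) (e : PySem.Set String × Int)
    (t : List String) :
    pvClassLookup (cls ++ [e]) t =
      match pvClassLookup cls t with
      | some v => some v
      | none => if pvSetEq t e.1 then some e.2 else none := by
  induction cls with
  | nil => simp [pvClassLookup]
  | cons p rest ih =>
      rw [List.cons_append, pvClassLookup, pvClassLookup]
      by_cases hs : pvSetEq t p.1 = true
      · simp [hs]
      · rw [if_neg hs, if_neg hs, ih]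

-- pvClassLookup compares its key only as a set, so set(patterns) may replace patterns
theorem pvClassLookup_ofList (cls : List (PySem.Set String × Int)) (t : List String) :
    pvClassLookup cls (PySem.Set.ofList t) = pvClassLookup cls t := by
  induction cls with
  | nil => rfl
  | cons p rest ih => rw [pvClassLookup, pvClassLookup, pvSetEq_ofList_left, ih]

theorem pvFind?_congr {t' t : List String} (h : pvSetEq t' t = true)
    (items : List (String × List String)) :
    items.find? (fun p => pvSetEq t' p.2) = items.find? (fun p => pvSetEq t p.2) := by
  congr 1
  funext p
  exact pvSetEq_congr_left h p.2

theorem pvFind?_append (items : List (String × List String)) (e : String × List String)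
    (P : String × List String → Bool) :
    (items ++ [e]).find? P =
      match items.find? P with
      | some q => some q
      | none => if P e then some e else none := by
  induction items with
  | nil => simp [List.find?]
  | cons p rest ih =>
      rw [List.cons_append, List.find?_cons, List.find?_cons]
      by_cases hp : P p = true
      · simp [hp]
      · simp only [hp, Bool.false_eq_true, if_false]
        exact ih

-- main loop correspondence
theorem pvLoop_eq (dict : List (String × List String)) :
    ∀ (todo : List (String × List String)) (u : PySem.Dict String (List String))
      (eq : PySem.Dict String Int) (num : Int) (cls : List (PySem.Set String × Int)),
      ((u.items.map Prod.fst) ++ (todo.map Prod.fst)).Nodup →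
      pvInv cls u.items eq →
      (todo.foldl (pvStepA dict) (u, eq, num)).1 =
        (todo.foldl (pvStepB (PySem.Set.ofList (dict.map Prod.fst)) ) (cls, eq, u, num)).2.2.1 ∧
      (todo.foldl (pvStepA dict) (u, eq, num)).2.1 =
        (todo.foldl (pvStepB (PySem.Set.ofList (dict.map Prod.fst)) ) (cls, eq, u, num)).2.1 ∧
      (todo.foldl (pvStepA dict) (u, eq, num)).2.2 =
        (todo.foldl (pvStepB (PySem.Set.ofList (dict.map Prod.fst)) ) (cls, eq, u, num)).2.2.2 := by
  intro todo
  induction todo with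
  | nil => intro u eq num cls _ _; exact ⟨rfl, rfl, rfl⟩
  | cons kv rest ih =>
    intro u eq num cls hnodup hinv
    obtain ⟨k, defn⟩ := kv
    rw [List.map_cons] at hnodup
    -- the pattern list computed by both sides
    set t : List String := defn.map (fun rule =>
      String.mk (rule.toList.map (fun ch =>
        if (PySem.Set.ofList (dict.map Prod.fst)).contains (String.singleton ch) then '_' else ch)))
      with ht
    -- facts from Nodup
    have hkA : ∀ p ∈ u.items, p.1 ≠ k := by
      intro p hp hEq
      have hmem : p.1 ∈ u.items.map Prod.fst := List.mem_map_of_mem hp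
      have hdisj := (List.nodup_append.mp hnodup).2.2
      rw [hEq] at hmem
      exact hdisj _ hmem _ (List.mem_cons_self ..) rfl
    have hfresh : u.contains k = false := by
      rw [← Bool.not_eq_true, PySem.Dict.contains_iff_mem_keys]
      intro hmem
      have : k ∈ u.items.map Prod.fst := by simpa [PySem.Dict.keys] using hmem
      obtain ⟨p, hp, hpk⟩ := List.mem_map.mp this
      exact hkA p hp hpk
    have hui : (u.insert k t).items = u.items ++ [(k, t)] := by
      simp [PySem.Dict.items_insert, hfresh]
    have hnodup' : (((u.insert k t).items.map Prod.fst) ++ (rest.map Prod.fst)).Nodup := by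
      rw [hui, List.map_append]
      rw [List.append_cons] at hnodup
      simpa using hnodup
    -- step A computed
    have hstepA : pvStepA dict (u, eq, num) (k, defn) =
        (u.insert k t,
          match u.items.find? (fun p => pvSetEq t p.2) with
          | some p => (eq.insert k (eq.getD p.1 0), num)
          | none => (eq.insert k num, num + 1)) := by
      unfold pvStepA
      dsimp only
      rw [pvPatterns_eq, ← ht]
      unfold fill_eq_classes
      rw [PySem.Dict.getD_insert_self, hui, pvFillLoop_eq t k eq num u.items hkA]
    -- step B computed
    have hlook : pvClassLookup cls (PySem.Set.ofList t) =
        (u.items.find? (fun p => pvSetEq t p.2)).map (fun p => eq.getD p.1 0) := by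
      rw [pvClassLookup_ofList]; exact hinv t
    rcases hfind : u.items.find? (fun p => pvSetEq t p.2) with _ | p
    · -- no earlier nonterminal with this pattern set: a new class
      rw [hfind] at hlook
      have hstepB : pvStepB (PySem.Set.ofList (dict.map Prod.fst)) (cls, eq, u, num) (k, defn) =
          (cls ++ [(PySem.Set.ofList t, num)], eq.insert k num, u.insert k t, num + 1) := by
        unfold pvStepB
        dsimp only
        rw [← ht, hlook]
        rfl
      rw [List.foldl_cons, List.foldl_cons, hstepA, hstepB, hfind]
      apply ih
      · exact hnodup'
      · intro t'
        rw [hui, pvClassLookup_append, pvFind?_append, hinv t']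
        rcases hf' : u.items.find? (fun p => pvSetEq t' p.2) with _ | q
        · rw [hf']
          dsimp only [Option.map_none]
          rw [pvSetEq_ofList_right]
          by_cases hst : pvSetEq t' t = true
          · rw [if_pos hst, if_pos (by exact hst), Option.map_some]
            rw [PySem.Dict.getD_insert_self]
          · rw [if_neg hst, if_neg (by exact hst), Option.map_none]
        · rw [hf']
          have hq : q.1 ≠ k := hkA q (List.mem_of_find?_eq_some hf')
          dsimp only [Option.map_some]
          rw [PySem.Dict.getD_insert, if_neg hq]
    · -- found: reuse the class of the first matching earlier nonterminal
      rw [hfind] at hlook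
      have hstepB : pvStepB (PySem.Set.ofList (dict.map Prod.fst)) (cls, eq, u, num) (k, defn) =
          (cls, eq.insert k (eq.getD p.1 0), u.insert k t, num) := by
        unfold pvStepB
        dsimp only
        rw [← ht, hlook]
        rfl
      rw [List.foldl_cons, List.foldl_cons, hstepA, hstepB, hfind]
      apply ih
      · exact hnodup'
      · intro t'
        rw [hui, pvFind?_append, hinv t']
        rcases hf' : u.items.find? (fun p => pvSetEq t' p.2) with _ | q
        · rw [hf']
          dsimp only [Option.map_none]
          by_cases hst : pvSetEq t' t = true
          · exfalso
            rw [pvFind?_congr hst, hfind] at hf'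
            cases hf'
          · rw [if_neg (by exact hst), Option.map_none]
        · rw [hf']
          have hq : q.1 ≠ k := hkA q (List.mem_of_find?_eq_some hf')
          dsimp only [Option.map_some]
          rw [PySem.Dict.getD_insert, if_neg hq]

-- ===== VERDICT (by name: the statement is the Claim_ definition above) =====
theorem first_split_classes_spec : Claim_equal_first_split_classes := by
  intro dict _ hpre
  unfold Spec_first_split_classes first_split_classes first_split_classes_alt
  have h := pvLoop_eq dict dict PySem.Dict.empty PySem.Dict.empty 0 []
    (by simpa [PySem.Dict.empty] using hpre)
    (by intro t; simp [pvClassLookup, PySem.Dict.empty])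
  obtain ⟨h1, h2, h3⟩ := h
  simp only []
  exact Prod.ext (by rw [h2]) (Prod.ext (by rw [h1]) (by rw [h3]))
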